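-- pv_equiv track=rewrite | github.com/yd9508/learn_leetcode | Array/Split a String in Balanced Strings.py | isBalanceStr
-- ===== SOURCE A (Python) =====
-- def isBalanceStr(s):
--     dic = {}
--     dic["L"] = 0
--     dic["R"] = 0
--     for i in range(len(s)):
--         if s[i] == "L":
--             dic["L"] = dic["L"] + 1
--         else:
--             dic["R"] = dic["R"] + 1
--
--     if dic["R"] == dic["L"]:
--         return True
--     else:
--         return False
-- ===== SOURCE B (Python) =====
-- def isBalanceStr(s):
--     # stack cancellation: normalize each char to 'L'/'R', cancel a char against
--     # an opposite top-of-stack; the string is balanced iff the stack ends empty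
--     stack = []
--     for c in s:
--         c = c if c == "L" else "R"
--         if stack and stack[-1] != c:
--             stack.pop()
--         else:
--             stack.append(c)
--     return not stack
-- ===== Notes on version B (the rewrite author's own statement) =====
-- stated objective: alternative
-- what changed: Replaces A's dual-counter dict with a stack-cancellation algorithm: each character is normalized to one of the two letter classes and cancels an opposite top-of-stack element; the string is balanced iff the stack ends empty.
import Mathlib
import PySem

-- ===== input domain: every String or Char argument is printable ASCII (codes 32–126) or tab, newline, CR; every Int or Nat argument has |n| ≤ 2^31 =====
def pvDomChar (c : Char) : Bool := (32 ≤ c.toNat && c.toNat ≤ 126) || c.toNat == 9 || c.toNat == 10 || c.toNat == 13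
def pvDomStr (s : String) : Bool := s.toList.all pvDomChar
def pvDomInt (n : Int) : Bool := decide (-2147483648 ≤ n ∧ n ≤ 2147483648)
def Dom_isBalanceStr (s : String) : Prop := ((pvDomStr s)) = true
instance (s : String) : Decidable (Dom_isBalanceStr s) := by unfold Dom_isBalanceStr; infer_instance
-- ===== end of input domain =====

-- B replaces A's dual-counter dict loop by a stack-cancellation algorithm (each char is put in
-- one of the two letter classes and cancels an opposite top-of-stack; balanced iff the stack ends
-- empty): alternative, same cost.

-- ===== PORT A =====
-- dic["L"] += 1 / dic["R"] += 1: the keys are pre-inserted, so getD never sees its default.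
def isBalanceStr (s : String) : Bool :=
  let dic : PySem.Dict String Int := (PySem.Dict.empty.insert "L" 0).insert "R" 0
  let dic := (PySem.List.pyRange 0 (PySem.Str.len s) 1).foldl
    (fun d i =>
      if PySem.List.pyGetD s.toList i ' ' = 'L'
      then d.insert "L" (d.getD "L" 0 + 1)
      else d.insert "R" (d.getD "R" 0 + 1)) dic
  if dic.getD "R" 0 = dic.getD "L" 0 then true else false

-- ===== PORT B =====
-- Python's stack end (append / [-1] / pop) is the Lean list's end (++ [·] / getLast? / dropLast).
def pvStep (st : List Char) (c : Char) : List Char :=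
  let c' := if c = 'L' then 'L' else 'R'
  if !st.isEmpty && st.getLast? != some c' then st.dropLast else st ++ [c']

def isBalanceStr_alt (s : String) : Bool :=
  (s.toList.foldl pvStep []).isEmpty

-- ===== PRECONDITION & SPEC =====
def Spec_isBalanceStr (s : String) (out : Bool) : Prop := out = isBalanceStr_alt s
instance (s : String) (out : Bool) : Decidable (Spec_isBalanceStr s out) := by unfold Spec_isBalanceStr; infer_instance

-- ===== CLAIM (what is proved, stated in full; the proofs are below) =====
def Claim_equal_isBalanceStr : Prop := ∀ (s : String), Dom_isBalanceStr s → Spec_isBalanceStr s (isBalanceStr s)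

-- ===== LEMMAS AND PROOFS =====

-- the dict state A's loop maintains
def dLR (x y : Int) : PySem.Dict String Int := (PySem.Dict.empty.insert "L" x).insert "R" y

theorem dLR_getD_L (x y : Int) : (dLR x y).getD "L" 0 = x := by
  simp [dLR, PySem.Dict.getD, PySem.Dict.get?, PySem.Dict.insert, PySem.Dict.empty]

theorem dLR_getD_R (x y : Int) : (dLR x y).getD "R" 0 = y := by
  simp [dLR, PySem.Dict.getD, PySem.Dict.get?, PySem.Dict.insert, PySem.Dict.empty]

theorem dLR_insert_L (x y v : Int) : (dLR x y).insert "L" v = dLR v y := by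
  simp [dLR, PySem.Dict.insert, PySem.Dict.empty]

theorem dLR_insert_R (x y v : Int) : (dLR x y).insert "R" v = dLR x v := by
  simp [dLR, PySem.Dict.insert, PySem.Dict.empty]

-- A's loop invariant: the two counters track #L and #non-L
theorem loop_inv (cs : List Char) : ∀ (x y : Int),
    cs.foldl (fun d c =>
      if c = 'L' then d.insert "L" (d.getD "L" 0 + 1)
      else d.insert "R" (d.getD "R" 0 + 1)) (dLR x y)
      = dLR (x + cs.count 'L') (y + (cs.length - cs.count 'L')) := by
  induction cs with
  | nil => intro x y; simp
  | cons c t ih =>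
    intro x y
    by_cases hc : c = 'L'
    · subst hc
      rw [List.foldl_cons, if_pos rfl, dLR_getD_L, dLR_insert_L, ih]
      congr 1 <;> simp <;> omega
    · rw [List.foldl_cons, if_neg hc, dLR_getD_R, dLR_insert_R, ih]
      congr 1 <;> simp [hc] <;> omega

-- canonical stack holding signed balance z: z copies of 'L' if z ≥ 0, else -z copies of 'R'
def stk (z : Int) : List Char :=
  if 0 ≤ z then List.replicate z.toNat 'L' else List.replicate (-z).toNat 'R'

theorem stk_pos (z : Int) (h : 0 ≤ z) : stk z = List.replicate z.toNat 'L' := by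
  simp [stk, h]

theorem stk_neg (z : Int) (h : z < 0) : stk z = List.replicate (-z).toNat 'R' := by
  simp [stk, not_le.mpr h]

theorem step_L_push (n : Nat) : pvStep (List.replicate n 'L') 'L' = List.replicate (n + 1) 'L' := by
  cases n <;> simp [pvStep, List.getLast?_replicate, ← List.replicate_succ']

theorem step_R_pop (n : Nat) : pvStep (List.replicate (n + 1) 'R') 'L' = List.replicate n 'R' := by
  simp [pvStep, List.getLast?_replicate, List.dropLast_replicate]

theorem step_L_pop (n : Nat) (c : Char) (hc : ¬ c = 'L') :
    pvStep (List.replicate (n + 1) 'L') c = List.replicate n 'L' := by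
  simp [pvStep, hc, List.getLast?_replicate, List.dropLast_replicate]

theorem step_R_push (n : Nat) (c : Char) (hc : ¬ c = 'L') :
    pvStep (List.replicate n 'R') c = List.replicate (n + 1) 'R' := by
  cases n <;> simp [pvStep, hc, List.getLast?_replicate, ← List.replicate_succ']

theorem stk_step (z : Int) (c : Char) :
    pvStep (stk z) c = stk (z + (if c = 'L' then 1 else -1)) := by
  by_cases hc : c = 'L'
  · rw [show (if c = 'L' then (1:Int) else -1) = 1 by simp [hc], hc]
    by_cases hz : 0 ≤ z
    · rw [stk_pos z hz, step_L_push, stk_pos (z + 1) (by omega)]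
      congr 1; omega
    · obtain ⟨m, hm⟩ : ∃ m, (-z).toNat = m + 1 := ⟨(-z).toNat - 1, by omega⟩
      rw [stk_neg z (by omega), hm, step_R_pop]
      by_cases h1 : z + 1 = 0
      · rw [h1, show m = 0 by omega]; simp [stk]
      · rw [stk_neg _ (by omega)]; congr 1; omega
  · rw [show (if c = 'L' then (1:Int) else -1) = -1 by simp [hc]]
    by_cases hz : z ≤ 0
    · rw [stk_neg (z + -1) (by omega), show stk z = List.replicate (-z).toNat 'R' by
        by_cases h0 : z = 0
        · subst h0; simp [stk]
        · exact stk_neg z (by omega),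
        step_R_push _ c hc]
      congr 1; omega
    · obtain ⟨m, hm⟩ : ∃ m, z.toNat = m + 1 := ⟨z.toNat - 1, by omega⟩
      rw [stk_pos z (by omega), hm, step_L_pop _ c hc]
      rw [stk_pos (z + -1) (by omega)]
      congr 1; omega

theorem stk_fold (cs : List Char) : ∀ (z : Int),
    cs.foldl pvStep (stk z) = stk (z + ((cs.count 'L' : Int) - (cs.length - cs.count 'L'))) := by
  induction cs with
  | nil => intro z; simp
  | cons c t ih =>
    intro z
    rw [List.foldl_cons, stk_step, ih]
    by_cases hc : c = 'L' <;> simp [hc] <;> congr 1 <;> omega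

theorem stk_empty_iff (z : Int) : (stk z).isEmpty = true ↔ z = 0 := by
  unfold stk; split_ifs <;> simp <;> omega

-- ===== VERDICT (by name: the statement is the Claim_ definition above) =====
theorem isBalanceStr_spec : Claim_equal_isBalanceStr := by
  intro s _
  unfold Spec_isBalanceStr isBalanceStr isBalanceStr_alt
  have h := PySem.List.foldl_pyRange_zero_pyGetD (xs := s.toList) (d := ' ')
    (f := fun (d : PySem.Dict String Int) c =>
      if c = 'L' then d.insert "L" (d.getD "L" 0 + 1)
      else d.insert "R" (d.getD "R" 0 + 1))
    (init := dLR 0 0)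
  show (if _ = _ then true else false) = _
  rw [show PySem.Str.len s = PySem.List.len s.toList from rfl,
      show ((PySem.Dict.empty.insert "L" (0:Int)).insert "R" 0) = dLR 0 0 from rfl,
      h, loop_inv, dLR_getD_L, dLR_getD_R,
      show ([] : List Char) = stk 0 from rfl, stk_fold]
  have hle : s.toList.count 'L' ≤ s.toList.length := List.count_le_length
  split_ifs with hif
  · symm; rw [stk_empty_iff]; omega
  · symm; rw [Bool.eq_false_iff, Ne, stk_empty_iff]; omega
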